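-- pv_equiv track=rewrite | github.com/Rahonam/algorithm-syllabus | array/even_xor_pairs.py | evenXor
-- ===== SOURCE A (Python) =====
-- def evenXor(arr: list):
--     """
--     Find the number of pairs with even XOR
--
--     For bits:
--         XOR is 0 if same bits, otherwise 1
--
--     For numbers:
--         XOR is odd if one number is odd and another is even, otherwise even
--
--     using: iteration
--
--     Args:
--         arr: array of integers
--
--     Returns:
--         int: count of even XOR pairs
--     """
--     if len(arr) == 1:
--         return 1
--
--     odd_count = 0
--     even_count = 0
--     for i in arr:
--         if i % 2 == 0:
--             even_count += 1
--         else: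
--             odd_count += 1
--
--     return int((odd_count * (odd_count - 1) / 2) + (even_count * (even_count - 1) / 2))
-- ===== SOURCE B (Python) =====
-- def evenXor(arr: list):
--     if len(arr) == 1:
--         return 1
--     count = 0
--     rest = arr
--     while rest:
--         x, rest = rest[0], rest[1:]
--         for y in rest:
--             if x % 2 == y % 2:
--                 count += 1
--     return count
-- ===== Notes on version B (the rewrite author's own statement) =====
-- stated objective: alternative
-- what changed: Replaces the odd/even tally plus closed-form n*(n-1)/2 combination arithmetic with an explicit O(n^2) enumeration of all pairs, counting pairs whose elements have equal parity (even XOR).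
import Mathlib
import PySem

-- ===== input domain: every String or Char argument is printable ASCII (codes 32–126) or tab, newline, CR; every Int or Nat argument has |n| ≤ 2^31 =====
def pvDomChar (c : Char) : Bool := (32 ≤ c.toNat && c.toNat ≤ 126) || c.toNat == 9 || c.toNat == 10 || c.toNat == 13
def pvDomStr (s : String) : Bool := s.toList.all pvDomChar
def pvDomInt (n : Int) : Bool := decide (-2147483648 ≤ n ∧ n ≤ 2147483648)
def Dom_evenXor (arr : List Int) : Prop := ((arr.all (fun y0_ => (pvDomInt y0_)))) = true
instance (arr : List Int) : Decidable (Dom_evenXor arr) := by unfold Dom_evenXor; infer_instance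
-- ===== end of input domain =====

-- B replaces A's odd/even tally + closed-form n*(n-1)/2 arithmetic by an explicit
-- enumeration of all pairs, counting those with equal parity (even XOR); objective: alternative.

-- ===== PORT A =====
-- A's odd/even tally loop; the final `int((o*(o-1)/2)+(e*(e-1)/2))` is exact here since
-- both numerators are nonnegative and even, so integer division is the same value.
def evenXor (arr : List Int) : Int :=
  if arr.length == 1 then 1
  else
    let oe := arr.foldl
      (fun (p : Int × Int) i => if i % 2 == 0 then (p.1, p.2 + 1) else (p.1 + 1, p.2))
      (0, 0)
    oe.1 * (oe.1 - 1) / 2 + oe.2 * (oe.2 - 1) / 2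

-- ===== PORT B =====
-- inner `for y in rest` loop of Source B
def evenXorInner (x : Int) (rest : List Int) (count : Int) : Int :=
  rest.foldl (fun c y => if x % 2 == y % 2 then c + 1 else c) count

-- the `while rest` loop of Source B
def evenXorLoop : List Int → Int → Int
  | [], count => count
  | x :: rest, count => evenXorLoop rest (evenXorInner x rest count)

def evenXor_alt (arr : List Int) : Int :=
  if arr.length == 1 then 1
  else evenXorLoop arr 0

-- ===== PRECONDITION & SPEC =====
def Spec_evenXor (arr : List Int) (out : Int) : Prop := out = evenXor_alt arr
instance (arr : List Int) (out : Int) : Decidable (Spec_evenXor arr out) := by unfold Spec_evenXor; infer_instance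

-- ===== CLAIM (what is proved, stated in full; the proofs are below) =====
def Claim_equal_evenXor : Prop := ∀ (arr : List Int), Dom_evenXor arr → Spec_evenXor arr (evenXor arr)

-- ===== LEMMAS AND PROOFS =====

-- number of odd / even elements, as integers
def ocount (l : List Int) : Int := ((l.filter (fun i => ¬ i % 2 = 0)).length : Int)
def ecount (l : List Int) : Int := ((l.filter (fun i => i % 2 = 0)).length : Int)

theorem ocount_nonneg (l : List Int) : 0 ≤ ocount l := Int.natCast_nonneg _

theorem ecount_nonneg (l : List Int) : 0 ≤ ecount l := Int.natCast_nonneg _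

theorem ocount_cons (x : Int) (l : List Int) :
    ocount (x :: l) = if x % 2 = 0 then ocount l else ocount l + 1 := by
  simp only [ocount, List.filter_cons]
  split_ifs <;> simp_all

theorem ecount_cons (x : Int) (l : List Int) :
    ecount (x :: l) = if x % 2 = 0 then ecount l + 1 else ecount l := by
  simp only [ecount, List.filter_cons]
  split_ifs <;> simp_all

-- A's tally fold computes (odd count, even count) added to the accumulator
theorem foldA_eq (l : List Int) (a b : Int) :
    l.foldl (fun (p : Int × Int) i => if i % 2 == 0 then (p.1, p.2 + 1) else (p.1 + 1, p.2)) (a, b)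
      = (a + ocount l, b + ecount l) := by
  induction l generalizing a b with
  | nil => simp [ocount, ecount]
  | cons x l ih =>
    simp only [List.foldl_cons]
    by_cases h : x % 2 = 0
    · have hb : (x % 2 == 0) = true := by simpa using h
      rw [hb, if_pos rfl, ih, ocount_cons, ecount_cons, if_pos h, if_pos h]
      refine Prod.ext ?_ ?_ <;> simp <;> ring
    · have hb : (x % 2 == 0) = false := by simpa using h
      rw [hb]
      simp only [Bool.false_eq_true, if_false]
      rw [ih, ocount_cons, ecount_cons, if_neg h, if_neg h]
      refine Prod.ext ?_ ?_ <;> simp <;> ring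

-- B's inner loop adds the number of elements of rest with the same parity as x
theorem inner_eq (x : Int) (rest : List Int) (c : Int) :
    evenXorInner x rest c = c + (if x % 2 = 0 then ecount rest else ocount rest) := by
  induction rest generalizing c with
  | nil => simp [evenXorInner, ocount, ecount]
  | cons y l ih =>
    simp only [evenXorInner, List.foldl_cons] at *
    rw [ih]
    rw [ocount_cons, ecount_cons]
    have hx : x % 2 = 0 ∨ x % 2 = 1 := by omega
    have hy : y % 2 = 0 ∨ y % 2 = 1 := by omega
    rcases hx with hx | hx <;> rcases hy with hy | hy <;>
      simp [hx, hy] <;> omega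

-- n*(n-1) is even
theorem mul_pred_even (n : Int) : ∃ k, n * (n - 1) = 2 * k := by
  rcases Int.even_mul_succ_self (n - 1) with ⟨k, hk⟩
  exact ⟨k, by rw [show n * (n - 1) = (n - 1) * (n - 1 + 1) by ring, hk]; ring⟩

-- B's outer loop equals A's closed form
theorem loop_eq (l : List Int) (c : Int) :
    evenXorLoop l c = c + ocount l * (ocount l - 1) / 2 + ecount l * (ecount l - 1) / 2 := by
  induction l generalizing c with
  | nil => simp [evenXorLoop, ocount, ecount]
  | cons x l ih =>
    simp only [evenXorLoop]
    rw [ih, inner_eq, ocount_cons, ecount_cons]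
    obtain ⟨k, hk⟩ := mul_pred_even (ocount l)
    obtain ⟨m, hm⟩ := mul_pred_even (ecount l)
    have ho := ocount_nonneg l
    have he := ecount_nonneg l
    by_cases h : x % 2 = 0 <;> simp only [h, if_true, if_false] <;>
      [ (have h2 : (ecount l + 1) * (ecount l + 1 - 1) = 2 * m + 2 * ecount l := by
          rw [show (ecount l + 1) * (ecount l + 1 - 1) = ecount l * (ecount l - 1) + 2 * ecount l by ring, hm]);
        (have h2 : (ocount l + 1) * (ocount l + 1 - 1) = 2 * k + 2 * ocount l := by
          rw [show (ocount l + 1) * (ocount l + 1 - 1) = ocount l * (ocount l - 1) + 2 * ocount l by ring, hk]) ] <;>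
      rw [h2, hk, hm] <;> omega

-- ===== VERDICT (by name: the statement is the Claim_ definition above) =====
theorem evenXor_spec : Claim_equal_evenXor := by
  intro arr _
  unfold Spec_evenXor evenXor evenXor_alt
  by_cases h : arr.length == 1
  · simp [h]
  · simp only [h, if_false, Bool.false_eq_true]
    rw [loop_eq]
    rw [foldA_eq]
    ring_nf
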